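-- pv_equiv track=rewrite | github.com/flsing/ITI1120 | lab9/lab9-solutions/applications-solved.py | one_unique_at_least
-- ===== SOURCE A (Python) =====
-- def one_unique_at_least(L):
--      '''(list)->bool
--      Returns True if there exist at least one element in L that is unique,
--      in other words, that appears exactlly once in the list
--      Precondition: L is not empty
--      >>> one_unique_at_least([2,2,2,2,8])
--      True
--      >>> one_unique_at_least([2,1,2])
--      True
--      >>> one_unique_at_least([1,-20,-1])
--      True
--      >>> one_unique_at_least([3,2,2,3,3])
--      False
--      >>> one_unique_at_least([10])
--      True
--      >>> one_unique_at_least([10,10])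
--      False
--      >>> one_unique_at_least([10,-1])
--      True
--      '''
--      X=sorted(L) # X is a sorted versin of L
--
--      # answer in short lists, those of length 1
--      if len(X)==1:
--           return True
--
--      # 1st element is unique if the one after is different
--      # last element is unique if the one before is different
--      # Every other element is unique if both the one before
--      # and the one after are different for it
--
--      for i in range(len(X)):
--           if i==0 and X[i]!=X[i+1]: # first element
--                return True
--           elif i==len(L)-1 and X[i]!=X[i-1]: # last element
--                return True
--           else: #neither first nor last element
--                if X[i]!=X[i-1] and X[i]!=X[i+1]:
--                     return True
--      return False
-- ===== SOURCE B (Python) =====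
-- def one_unique_at_least(L):
--     return any(L.count(x) == 1 for x in L)
-- ===== Notes on version B (the rewrite author's own statement) =====
-- stated objective: idiomatic
-- what changed: Replaces the sort plus adjacent-neighbour index scan (with special cases for first/last element) by a one-line any() over per-element counts: an element is unique iff its count in L is 1.
import Mathlib
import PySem

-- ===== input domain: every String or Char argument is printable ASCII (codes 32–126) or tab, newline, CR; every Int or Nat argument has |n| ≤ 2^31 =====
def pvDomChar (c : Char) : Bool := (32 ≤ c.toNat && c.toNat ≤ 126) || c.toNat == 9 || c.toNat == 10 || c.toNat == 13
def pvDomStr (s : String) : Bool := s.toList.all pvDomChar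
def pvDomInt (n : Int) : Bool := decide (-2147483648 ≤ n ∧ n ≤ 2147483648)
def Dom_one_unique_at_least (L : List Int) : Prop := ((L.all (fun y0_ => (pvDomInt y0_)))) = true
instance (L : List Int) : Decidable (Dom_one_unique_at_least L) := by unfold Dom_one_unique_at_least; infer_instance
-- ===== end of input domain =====

-- B replaces A's sort + adjacent-neighbour index scan by a single any() over per-element
-- counts (idiomatic, not faster); neither version mutates its argument.

-- ===== PORT A =====
-- X[i] as A uses it: plain Python indexing (negative wraps); on every index A actually
-- reads the index is in range, so the .getD 0 default is never the returned value.
def pvGetA (X : List Int) (i : Int) : Int := (PySem.List.pyGet? X i).getD 0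

-- the 'for i in range(len(X))' loop with its early returns
def pvLoopA (X : List Int) (n : Int) : List Int → Bool
  | [] => false
  | i :: rest =>
    if i == 0 && (pvGetA X i != pvGetA X (i + 1)) then true
    else if i == n - 1 && (pvGetA X i != pvGetA X (i - 1)) then true
    else if (pvGetA X i != pvGetA X (i - 1)) && (pvGetA X i != pvGetA X (i + 1)) then true
    else pvLoopA X n rest

def one_unique_at_least (L : List Int) : Bool :=
  let X := PySem.List.sorted L (fun x => x) false
  if X.length == 1 then true
  else pvLoopA X (L.length : Int) (PySem.List.pyRange 0 (X.length : Int) 1)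

-- ===== PORT B =====
def one_unique_at_least_alt (L : List Int) : Bool :=
  L.any (fun x => PySem.List.count L x == 1)

-- ===== PRECONDITION & SPEC =====
def Spec_one_unique_at_least (L : List Int) (out : Bool) : Prop := out = one_unique_at_least_alt L
instance (L : List Int) (out : Bool) : Decidable (Spec_one_unique_at_least L out) := by unfold Spec_one_unique_at_least; infer_instance

-- ===== CLAIM (what is proved, stated in full; the proofs are below) =====
def Claim_equal_one_unique_at_least : Prop := ∀ (L : List Int), Dom_one_unique_at_least L → Spec_one_unique_at_least L (one_unique_at_least L)

-- ===== LEMMAS AND PROOFS =====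

-- the per-index test of A's loop body, as one boolean
def pvBr (X : List Int) (n : Int) (i : Int) : Bool :=
  (i == 0 && (pvGetA X i != pvGetA X (i + 1))) ||
  (i == n - 1 && (pvGetA X i != pvGetA X (i - 1))) ||
  ((pvGetA X i != pvGetA X (i - 1)) && (pvGetA X i != pvGetA X (i + 1)))

lemma pvLoopA_eq_any (X : List Int) (n : Int) (ids : List Int) :
    pvLoopA X n ids = ids.any (pvBr X n) := by
  induction ids with
  | nil => rfl
  | cons i rest ih =>
    rw [pvLoopA]
    cases h1 : (i == 0 && (pvGetA X i != pvGetA X (i + 1))) <;>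
      cases h2 : (i == n - 1 && (pvGetA X i != pvGetA X (i - 1))) <;>
      cases h3 : ((pvGetA X i != pvGetA X (i - 1)) && (pvGetA X i != pvGetA X (i + 1))) <;>
      simp [pvBr, h1, h2, h3, ih]

-- pvGetA at a nonnegative (cast) index is getD
lemma pvGetA_natCast (X : List Int) (j : Nat) : pvGetA X (j : Int) = X.getD j 0 := by
  simp [pvGetA, PySem.List.pyGet?_natCast, List.getD_eq_getElem?_getD]

-- B says: some element of L has count 1
lemma alt_iff (L : List Int) :
    one_unique_at_least_alt L = true ↔ ∃ x ∈ L, L.count x = 1 := by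
  simp [one_unique_at_least_alt, List.any_eq_true, PySem.List.count_eq]

-- pvBr at a natural index, for a list of length ≥ 2
lemma pvBr_iff (X : List Int) (h2 : 2 ≤ X.length) (j : Nat) (hj : j < X.length) :
    pvBr X (X.length : Int) (j : Int) = true ↔
      ((j = 0 ∨ X.getD (j - 1) 0 ≠ X.getD j 0) ∧
       (j = X.length - 1 ∨ X.getD j 0 ≠ X.getD (j + 1) 0)) := by
  have gj : pvGetA X (j : Int) = X.getD j 0 := pvGetA_natCast X j
  have g1 : pvGetA X ((j : Int) + 1) = X.getD (j+1) 0 := by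
    have h : ((j : Int) + 1) = ((j+1 : Nat) : Int) := by push_cast; ring
    rw [h, pvGetA_natCast]
  simp only [pvBr, Bool.or_eq_true, Bool.and_eq_true, bne_iff_ne, beq_iff_eq, gj, g1]
  rcases Nat.eq_zero_or_pos j with h0 | hpos
  · -- first element: i - 1 is the Python wraparound index -1
    subst h0
    have gm1 : pvGetA X ((0 : Int) - 1) = X.getD (X.length - 1) 0 := by
      norm_num [pvGetA, PySem.List.pyGet?_neg_one, List.getLast?_eq_getElem?,
        List.getD_eq_getElem?_getD]
    have hne : ((0:Nat) : Int) ≠ (X.length : Int) - 1 := by omega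
    have hne2 : (0:Nat) ≠ X.length - 1 := by omega
    simp [hne2]
    tauto
  · have gm1 : pvGetA X ((j : Int) - 1) = X.getD (j-1) 0 := by
      have h : ((j : Int) - 1) = ((j-1 : Nat) : Int) := by omega
      rw [h, pvGetA_natCast]
    rcases Nat.eq_or_lt_of_le (Nat.succ_le_of_lt hj) with hl | hl
    · -- last element
      have hje : (j : Int) = (X.length : Int) - 1 := by omega
      have hj0 : ((j:Nat) : Int) ≠ (0:Int) := by omega
      have hj0' : j ≠ 0 := by omega
      have hrj : j = X.length - 1 := by omega
      simp only [gm1]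
      constructor
      · rintro ((⟨h, -⟩ | ⟨-, hb⟩) | ⟨hb, -⟩)
        · exact absurd h hj0
        · exact ⟨Or.inr (fun e => hb e.symm), Or.inl hrj⟩
        · exact ⟨Or.inr (fun e => hb e.symm), Or.inl hrj⟩
      · rintro ⟨hc | hc, -⟩
        · exact absurd hc hj0'
        · exact Or.inl (Or.inr ⟨hje, fun e => hc e.symm⟩)
    · -- middle element
      have hja : ((j:Nat) : Int) ≠ (0:Int) := by omega
      have hjb : ((j:Nat) : Int) ≠ (X.length : Int) - 1 := by omega
      have hja' : j ≠ 0 := by omega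
      have hjb' : j ≠ X.length - 1 := by omega
      simp [gm1, hjb, hja', hjb']
      intro _
      exact ne_comm

-- in a sorted list, an element is unique iff both neighbours differ
lemma count_one_iff (X : List Int) (hp : X.Pairwise (· ≤ ·)) (j : Nat) (hj : j < X.length) :
    X.count (X.getD j 0) = 1 ↔
      ((j = 0 ∨ X.getD (j - 1) 0 ≠ X.getD j 0) ∧
       (j = X.length - 1 ∨ X.getD j 0 ≠ X.getD (j + 1) 0)) := by
  have mono : ∀ p q : Nat, (hpq : p ≤ q) → (hq : q < X.length) → X[p]'(by omega) ≤ X[q] := by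
    intro p q hpq hq
    rcases Nat.lt_or_eq_of_le hpq with h | h
    · exact List.pairwise_iff_getElem.mp hp p q (by omega) hq h
    · subst h; exact le_refl _
  have hgd : ∀ k : Nat, (hk : k < X.length) → X.getD k 0 = X[k] := fun k hk => List.getD_eq_getElem X 0 hk
  -- occurrences of X[j] elsewhere force an equal neighbour
  have occL : ∀ k : Nat, (hk : k < X.length) → (hkj : k < j) → (he : X[k] = X[j]) → X[j-1]'(by omega) = X[j] := by
    intro k hk hkj he
    have h1 : X[k] ≤ X[j-1]'(by omega) := mono k (j-1) (by omega) (by omega)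
    have h2 : X[j-1]'(by omega) ≤ X[j] := mono (j-1) j (by omega) hj
    omega
  have occR : ∀ k : Nat, (hk : k < X.length) → (hkj : j < k) → (he : X[k] = X[j]) → X[j+1]'(by omega) = X[j] := by
    intro k hk hkj he
    have h1 : X[j+1]'(by omega) ≤ X[k] := mono (j+1) k (by omega) hk
    have h2 : X[j] ≤ X[j+1]'(by omega) := mono j (j+1) (by omega) (by omega)
    omega
  -- count decomposition around index j
  have hsplit0 : ∀ a : Int, X.count a = (X.take j).count a + (X.drop j).count a := by
    intro a
    conv_lhs => rw [← List.take_append_drop j X]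
    rw [List.count_append]
  have hdropc : X.drop j = X[j] :: X.drop (j+1) := by
    rw [List.drop_eq_getElem_cons hj]
  have hsplit : X.count (X[j]) =
      (X.take j).count (X[j]) + (1 + (X.drop (j+1)).count (X[j])) := by
    rw [hsplit0, hdropc, List.count_cons]
    simp
    omega
  conv_lhs => rw [hgd j hj]
  constructor
  · -- count 1 → neighbours differ
    intro hc
    constructor
    · by_cases h0 : j = 0
      · exact Or.inl h0
      · refine Or.inr ?_
        rw [hgd (j-1) (by omega), hgd j hj]
        intro he
        have hmem : X[j] ∈ X.take j := by
          rw [List.mem_take_iff_getElem]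
          exact ⟨j-1, by omega, he⟩
        have : 1 ≤ (X.take j).count (X[j]) := List.one_le_count_iff.mpr hmem
        omega
    · by_cases hl : j = X.length - 1
      · exact Or.inl hl
      · refine Or.inr ?_
        rw [hgd (j+1) (by omega), hgd j hj]
        intro he
        have hmem : X[j] ∈ X.drop (j+1) := by
          rw [List.mem_drop_iff_getElem]
          exact ⟨0, by omega, by simpa using he.symm⟩
        have : 1 ≤ (X.drop (j+1)).count (X[j]) := List.one_le_count_iff.mpr hmem
        omega
  · -- neighbours differ → count 1
    rintro ⟨hL, hR⟩
    have htake : (X.take j).count (X[j]) = 0 := by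
      rw [List.count_eq_zero]
      intro hmem
      rw [List.mem_take_iff_getElem] at hmem
      obtain ⟨k, hk, he⟩ := hmem
      have := occL k (by omega) (by omega) he
      rcases hL with h0 | hne
      · omega
      · exact hne (by rw [hgd (j-1) (by omega), hgd j hj]; exact this)
    have hdrop : (X.drop (j+1)).count (X[j]) = 0 := by
      rw [List.count_eq_zero]
      intro hmem
      rw [List.mem_drop_iff_getElem] at hmem
      obtain ⟨k, hk, he⟩ := hmem
      have := occR (j+1+k) (by omega) (by omega) he
      rcases hR with h0 | hne
      · omega
      · exact hne (by rw [hgd (j+1) (by omega), hgd j hj]; exact this.symm)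
    omega

-- ===== VERDICT (by name: the statement is the Claim_ definition above) =====
theorem one_unique_at_least_spec : Claim_equal_one_unique_at_least := by
  intro L _
  unfold Spec_one_unique_at_least
  rw [Bool.eq_iff_iff, alt_iff]
  have hperm : (PySem.List.sorted L (fun x => x) false).Perm L := PySem.List.sorted_perm L _ _
  have hp : (PySem.List.sorted L (fun x => x) false).Pairwise (· ≤ ·) :=
    PySem.List.sorted_pairwise L (fun x => x)
  set X := PySem.List.sorted L (fun x => x) false with hX
  have hlen : X.length = L.length := hperm.length_eq
  have hA : one_unique_at_least L =
      (if X.length == 1 then true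
       else pvLoopA X (L.length : Int) (PySem.List.pyRange 0 (X.length : Int) 1)) := rfl
  rw [hA]
  by_cases hl1 : X.length = 1
  · rw [if_pos (by simp [hl1])]
    obtain ⟨a, ha⟩ := List.length_eq_one_iff.mp (hlen ▸ hl1)
    exact ⟨fun _ => ⟨a, by simp [ha]⟩, fun _ => rfl⟩
  · rw [if_neg (by simp [hl1])]
    have hnL : ((L.length : Int)) = ((X.length : Int)) := by rw [hlen]
    rw [hnL, pvLoopA_eq_any]
    by_cases hl0 : X.length = 0
    · have hL0 : L = [] := by
        have := hlen ▸ hl0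
        exact List.length_eq_zero_iff.mp this
      simp [hl0, hL0, PySem.List.pyRange_one_eq_nil]
    · have h2 : 2 ≤ X.length := by omega
      constructor
      · intro hA
        rw [List.any_eq_true] at hA
        obtain ⟨i, hmem, hbr⟩ := hA
        rw [PySem.List.mem_pyRange_one] at hmem
        obtain ⟨h0i, hilt⟩ := hmem
        have hij : ((i.toNat : Nat) : Int) = i := Int.toNat_of_nonneg h0i
        have hjlt : i.toNat < X.length := by omega
        rw [← hij] at hbr
        have hQ := (pvBr_iff X h2 i.toNat hjlt).mp hbr
        have hc := (count_one_iff X hp i.toNat hjlt).mpr hQ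
        refine ⟨X.getD i.toNat 0, ?_, ?_⟩
        · rw [← hperm.mem_iff, List.getD_eq_getElem X 0 hjlt]
          exact List.getElem_mem hjlt
        · rw [← hperm.count_eq]
          exact hc
      · rintro ⟨x, hxL, hcx⟩
        have hxX : x ∈ X := hperm.mem_iff.mpr hxL
        obtain ⟨j, hj, hXj⟩ := List.mem_iff_getElem.mp hxX
        have hcX : X.count (X.getD j 0) = 1 := by
          rw [List.getD_eq_getElem X 0 hj, hXj, hperm.count_eq]
          exact hcx
        have hQ := (count_one_iff X hp j hj).mp hcX
        have hbr := (pvBr_iff X h2 j hj).mpr hQ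
        rw [List.any_eq_true]
        exact ⟨(j : Int), PySem.List.mem_pyRange_one.mpr ⟨by omega, by omega⟩, hbr⟩
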